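-- pv_equiv track=rewrite | github.com/hoahai/fastapi | apps/tradsphere/api/v1/endpoints/core/ui/main.py | _format_period_segment
-- ===== SOURCE A (Python) =====
-- _MONTH_ABBR = (
--     "",
--     "JAN",
--     "FEB",
--     "MAR",
--     "APR",
--     "MAY",
--     "JUN",
--     "JUL",
--     "AUG",
--     "SEP",
--     "OCT",
--     "NOV",
--     "DEC",
-- )
--
-- def _format_period_segment(months: list[int], year: int) -> str:
--     valid_months = [month for month in months if 1 <= month <= 12]
--     if not valid_months:
--         return f"Q?'{year % 100:02d}"
--
--     unique_months = sorted(set(valid_months))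
--     month_set = set(unique_months)
--     quarter_numbers = sorted({((month - 1) // 3) + 1 for month in unique_months})
--     full_quarters = all(
--         {quarter * 3 - 2, quarter * 3 - 1, quarter * 3}.issubset(month_set)
--         for quarter in quarter_numbers
--     )
--     if full_quarters and len(unique_months) == (len(quarter_numbers) * 3):
--         quarter_label = "Q" + ",".join(str(quarter) for quarter in quarter_numbers)
--         return f"{quarter_label}'{year % 100:02d}"
--
--     months_label = ",".join(_MONTH_ABBR[month] for month in unique_months)
--     return f"{months_label}'{year % 100:02d}"
-- ===== SOURCE B (Python) =====
-- _MONTH_ABBR = (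
--     "",
--     "JAN",
--     "FEB",
--     "MAR",
--     "APR",
--     "MAY",
--     "JUN",
--     "JUL",
--     "AUG",
--     "SEP",
--     "OCT",
--     "NOV",
--     "DEC",
-- )
--
-- def _format_period_segment(months: list[int], year: int) -> str:
--     # Accumulate a 12-bit presence mask; everything else is read off the bits.
--     mask = 0
--     for m in months:
--         if 1 <= m <= 12:
--             mask |= 1 << (m - 1)
--     yy = "%02d" % (year % 100)
--     if mask == 0:
--         return "Q?'" + yy
--     if all((mask >> (3 * (q - 1))) & 7 in (0, 7) for q in (1, 2, 3, 4)):
--         qs = [str(q) for q in (1, 2, 3, 4) if (mask >> (3 * (q - 1))) & 7 == 7]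
--         return "Q" + ",".join(qs) + "'" + yy
--     ms = [_MONTH_ABBR[i + 1] for i in range(12) if (mask >> i) & 1]
--     return ",".join(ms) + "'" + yy
-- ===== Notes on version B (the rewrite author's own statement) =====
-- stated objective: alternative
-- what changed: B replaces A's sort/dedup/set-algebra pipeline by a 12-bit presence bitmask built in one pass; 'full quarters' becomes the test that every 3-bit quarter block of the mask is 0 or 7 (subsuming A's issubset test and length check), and both labels are read straight off the bits in ascending order.
import Mathlib
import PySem

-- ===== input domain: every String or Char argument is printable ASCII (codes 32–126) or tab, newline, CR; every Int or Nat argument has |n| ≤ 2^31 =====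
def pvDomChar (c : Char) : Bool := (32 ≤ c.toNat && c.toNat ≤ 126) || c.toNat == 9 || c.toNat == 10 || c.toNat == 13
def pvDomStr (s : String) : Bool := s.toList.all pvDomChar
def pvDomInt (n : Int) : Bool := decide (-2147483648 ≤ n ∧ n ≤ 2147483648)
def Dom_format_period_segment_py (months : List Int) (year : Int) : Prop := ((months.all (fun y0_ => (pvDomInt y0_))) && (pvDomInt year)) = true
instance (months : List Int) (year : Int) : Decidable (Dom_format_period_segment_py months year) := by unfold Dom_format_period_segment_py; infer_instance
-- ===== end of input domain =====

-- B builds a 12-bit presence bitmask in one pass and reads quarters/months off its bits,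
-- instead of A's sort/dedup/set-algebra pipeline; objective: alternative. Same return value everywhere.

-- ===== PORT A =====
def pvAbbr : List String :=
  ["", "JAN", "FEB", "MAR", "APR", "MAY", "JUN", "JUL", "AUG", "SEP", "OCT", "NOV", "DEC"]

def format_period_segment_py (months : List Int) (year : Int) : String :=
  let valid_months := months.filter (fun month => decide (1 ≤ month) && decide (month ≤ 12))
  if valid_months = [] then
    "Q?'" ++ PySem.Str.zfill (PySem.Int.toStr (PySem.Int.mod year 100)) 2
  else
    let unique_months := PySem.List.sorted (PySem.Set.ofList valid_months) (fun x => x) false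
    let month_set := PySem.Set.ofList unique_months
    let quarter_numbers := PySem.List.sorted
      (PySem.Set.ofList (unique_months.map (fun month => PySem.Int.floordiv (month - 1) 3 + 1)))
      (fun x => x) false
    let full_quarters := quarter_numbers.all (fun quarter =>
      PySem.Set.issubset (PySem.Set.ofList [quarter * 3 - 2, quarter * 3 - 1, quarter * 3]) month_set)
    if full_quarters && (unique_months.length == quarter_numbers.length * 3) then
      ("Q" ++ PySem.Str.join "," (quarter_numbers.map (fun quarter => PySem.Int.toStr quarter))) ++ "'"
        ++ PySem.Str.zfill (PySem.Int.toStr (PySem.Int.mod year 100)) 2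
    else
      (PySem.Str.join "," (unique_months.map (fun month => (PySem.List.pyGet? pvAbbr month).getD ""))) ++ "'"
        ++ PySem.Str.zfill (PySem.Int.toStr (PySem.Int.mod year 100)) 2

-- ===== PORT B =====
-- 'mask |= 1 << (m - 1)' is only reached with 1 ≤ m ≤ 12, so '(m - 1).toNat' is exact there.
def format_period_segment_py_alt (months : List Int) (year : Int) : String :=
  let mask := months.foldl (fun acc (m : Int) =>
    if decide (1 ≤ m) && decide (m ≤ 12) then acc ||| (1 <<< (m - 1).toNat) else acc) 0
  let yy := PySem.Str.zfill (PySem.Int.toStr (PySem.Int.mod year 100)) 2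
  if mask == 0 then "Q?'" ++ yy
  else if ([1, 2, 3, 4] : List Int).all (fun q =>
      ((mask >>> (3 * (q - 1)).toNat) &&& 7 == 0) || ((mask >>> (3 * (q - 1)).toNat) &&& 7 == 7)) then
    ("Q" ++ PySem.Str.join "," ((([1, 2, 3, 4] : List Int).filter (fun q =>
      (mask >>> (3 * (q - 1)).toNat) &&& 7 == 7)).map (fun q => PySem.Int.toStr q))) ++ "'" ++ yy
  else
    (PySem.Str.join "," (((PySem.List.pyRange 0 12 1).filter (fun i =>
      (mask >>> i.toNat) &&& 1 == 1)).map (fun i => (PySem.List.pyGet? pvAbbr (i + 1)).getD ""))) ++ "'" ++ yy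

-- ===== PRECONDITION & SPEC =====
def Spec_format_period_segment_py (months : List Int) (year : Int) (out : String) : Prop := out = format_period_segment_py_alt months year
instance (months : List Int) (year : Int) (out : String) : Decidable (Spec_format_period_segment_py months year out) := by unfold Spec_format_period_segment_py; infer_instance

-- ===== CLAIM (what is proved, stated in full; the proofs are below) =====
def Claim_equal_format_period_segment_py : Prop := ∀ (months : List Int) (year : Int), Dom_format_period_segment_py months year → Spec_format_period_segment_py months year (format_period_segment_py months year)

-- ===== LEMMAS AND PROOFS =====

-- the 12-bit presence mask B accumulates
def pvMask (months : List Int) : Nat :=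
  months.foldl (fun acc (m : Int) =>
    if decide (1 ≤ m) && decide (m ≤ 12) then acc ||| (1 <<< (m - 1).toNat) else acc) 0

-- the (sorted, deduplicated) valid months
def pvPresent (months : List Int) : List Int :=
  (PySem.List.pyRange 1 13 1).filter (fun m => months.contains m)

def pvYY (year : Int) : String :=
  PySem.Str.zfill (PySem.Int.toStr (PySem.Int.mod year 100)) 2

-- A's quarter list and full-quarter condition over the sorted unique month list
def pvQA (u : List Int) : List Int :=
  PySem.List.sorted (PySem.Set.ofList (u.map (fun month => PySem.Int.floordiv (month - 1) 3 + 1)))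
    (fun x => x) false

def pvCondA (u : List Int) : Bool :=
  ((pvQA u).all (fun quarter =>
      PySem.Set.issubset (PySem.Set.ofList [quarter * 3 - 2, quarter * 3 - 1, quarter * 3])
        (PySem.Set.ofList u)))
    && (u.length == (pvQA u).length * 3)

-- B's condition, quarter list and month list, read off the mask
def pvCondB (mask : Nat) : Bool :=
  ([1, 2, 3, 4] : List Int).all (fun q =>
    ((mask >>> (3 * (q - 1)).toNat) &&& 7 == 0) || ((mask >>> (3 * (q - 1)).toNat) &&& 7 == 7))

def pvQB (mask : Nat) : List Int :=
  ([1, 2, 3, 4] : List Int).filter (fun q => (mask >>> (3 * (q - 1)).toNat) &&& 7 == 7)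

def pvMB (mask : Nat) : List Int :=
  ((PySem.List.pyRange 0 12 1).filter (fun i => (mask >>> i.toNat) &&& 1 == 1)).map (fun i => i + 1)

-- A's / B's label (everything before the year suffix)
def pvLabelA (u : List Int) : String :=
  if u = [] then "Q?'"
  else if pvCondA u then
    ("Q" ++ PySem.Str.join "," ((pvQA u).map (fun quarter => PySem.Int.toStr quarter))) ++ "'"
  else
    (PySem.Str.join "," (u.map (fun month => (PySem.List.pyGet? pvAbbr month).getD ""))) ++ "'"

def pvLabelB (mask : Nat) : String :=
  if mask == 0 then "Q?'"
  else if pvCondB mask then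
    ("Q" ++ PySem.Str.join "," ((pvQB mask).map (fun q => PySem.Int.toStr q))) ++ "'"
  else
    (PySem.Str.join "," (((PySem.List.pyRange 0 12 1).filter (fun i =>
      (mask >>> i.toNat) &&& 1 == 1)).map (fun i => (PySem.List.pyGet? pvAbbr (i + 1)).getD ""))) ++ "'"

-- everything that has to agree between the two labels, as one Boolean test
def pvOK (u : List Int) : Bool :=
  ((u == []) == (pvMask u == 0))
    && ((pvCondA u) == (pvCondB (pvMask u)))
    && ((!pvCondB (pvMask u)) || (pvQA u == pvQB (pvMask u)))
    && (pvMB (pvMask u) == u)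

-- pvOK holds on the decoded month list of every 12-bit mask
set_option maxRecDepth 20000 in
set_option maxHeartbeats 4000000 in
theorem pvKeyAll : ((List.range 4096).map pvMB).all pvOK = true := by decide

-- bit i of the fold is set iff some admitted month m has (m-1).toNat = i
theorem pvMask_testBit_aux : ∀ (l : List Int) (a : Nat) (i : Nat),
    ((l.foldl (fun acc (m : Int) =>
      if decide (1 ≤ m) && decide (m ≤ 12) then acc ||| (1 <<< (m - 1).toNat) else acc) a).testBit i)
    = (a.testBit i || l.any (fun m => decide (1 ≤ m) && decide (m ≤ 12) && ((m - 1).toNat == i))) := by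
  intro l
  induction l with
  | nil => intro a i; simp
  | cons m l ih =>
    intro a i
    rw [List.foldl_cons, ih, List.any_cons]
    by_cases h : (decide (1 ≤ m) && decide (m ≤ 12)) = true
    · rw [if_pos h, h]
      simp only [Nat.one_shiftLeft, Nat.testBit_or, Nat.testBit_two_pow, Bool.true_and,
        Bool.or_assoc]
      cases hb : (decide ((m - 1).toNat = i)) <;>
        cases hc : (((m - 1).toNat : Nat) == i) <;> simp_all
    · rw [if_neg h]
      simp only [Bool.not_eq_true] at h
      rw [h]
      simp

theorem pvMask_testBit (months : List Int) (i : Nat) :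
    (pvMask months).testBit i
      = months.any (fun m => decide (1 ≤ m) && decide (m ≤ 12) && ((m - 1).toNat == i)) := by
  unfold pvMask
  rw [pvMask_testBit_aux]
  rw [Nat.zero_testBit, Bool.false_or]

-- the mask is a 12-bit number
theorem pvMask_lt_aux : ∀ (l : List Int) (a : Nat), a < 4096 →
    (l.foldl (fun acc (m : Int) =>
      if decide (1 ≤ m) && decide (m ≤ 12) then acc ||| (1 <<< (m - 1).toNat) else acc) a) < 4096 := by
  intro l
  induction l with
  | nil => intro a ha; simpa using ha
  | cons m l ih =>
    intro a ha
    rw [List.foldl_cons]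
    by_cases h : (decide (1 ≤ m) && decide (m ≤ 12)) = true
    · rw [if_pos h]
      apply ih
      simp only [Bool.and_eq_true, decide_eq_true_eq] at h
      have hk : (m - 1).toNat ≤ 11 := by omega
      have h2 : 1 <<< (m - 1).toNat < 4096 := by
        rw [Nat.one_shiftLeft]
        calc 2 ^ (m - 1).toNat ≤ 2 ^ 11 := Nat.pow_le_pow_right (by norm_num) hk
        _ < 4096 := by norm_num
      have := Nat.or_lt_two_pow (n := 12) ha h2
      simpa using this
    · rw [if_neg h]
      exact ih a ha

theorem pvMask_lt (months : List Int) : pvMask months < 4096 :=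
  pvMask_lt_aux months 0 (by norm_num)

theorem pvOK_mask (months : List Int) : pvOK (pvMB (pvMask months)) = true :=
  List.all_eq_true.mp pvKeyAll _
    (List.mem_map_of_mem (List.mem_range.mpr (pvMask_lt months)))

-- the mask of the raw list equals the mask of its sorted unique valid months
theorem pvMask_present (months : List Int) : pvMask months = pvMask (pvPresent months) := by
  apply Nat.eq_of_testBit_eq
  intro i
  rw [pvMask_testBit, pvMask_testBit, Bool.eq_iff_iff]
  simp only [pvPresent, List.any_eq_true, List.mem_filter, PySem.List.mem_pyRange_one,
    Bool.and_eq_true, decide_eq_true_eq, beq_iff_eq, List.contains_iff_mem]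
  constructor
  · rintro ⟨m, hm, ⟨h1, h2⟩, hi⟩
    exact ⟨m, ⟨⟨h1, by omega⟩, hm⟩, ⟨h1, h2⟩, hi⟩
  · rintro ⟨m, ⟨_, hm⟩, hc, hi⟩
    exact ⟨m, hm, hc, hi⟩

-- the bit test reads membership
theorem pvBit (m k : Nat) : (((m >>> k) &&& 1) == 1) = m.testBit k := by
  rw [Bool.eq_iff_iff]
  simp only [beq_iff_eq, Nat.and_one_is_mod, Nat.testBit, Nat.one_and_eq_mod_two,
    bne_iff_ne, ne_eq]
  omega

theorem pvBit_contains (months : List Int) (i : Int) (h0 : 0 ≤ i) (h1 : i < 12) :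
    (((pvMask months >>> i.toNat) &&& 1) == 1) = months.contains (i + 1) := by
  rw [pvBit, pvMask_testBit, Bool.eq_iff_iff]
  simp only [List.any_eq_true, Bool.and_eq_true, decide_eq_true_eq, beq_iff_eq,
    List.contains_iff_mem]
  constructor
  · rintro ⟨m, hm, ⟨hm1, hm2⟩, hk⟩
    have : m = i + 1 := by omega
    rwa [← this]
  · intro hmem
    exact ⟨i + 1, hmem, ⟨by omega, by omega⟩, by omega⟩

theorem pvRange_shift :
    PySem.List.pyRange 1 13 1 = (PySem.List.pyRange 0 12 1).map (fun i => i + 1) := by decide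

-- the sorted unique valid months are exactly the decoded mask
theorem pvPresent_eq (months : List Int) : pvPresent months = pvMB (pvMask months) := by
  unfold pvPresent pvMB
  rw [pvRange_shift, List.filter_map]
  congr 1
  apply List.filter_congr
  intro i hi
  have hmem := PySem.List.mem_pyRange_one.mp hi
  simp only [Function.comp_apply]
  exact (pvBit_contains months i (by omega) (by omega)).symm

-- valid_months is empty exactly when pvPresent is
theorem pvEmpty_iff (months : List Int) :
    months.filter (fun month => decide (1 ≤ month) && decide (month ≤ 12)) = [] ↔ pvPresent months = [] := by
  simp only [pvPresent, List.filter_eq_nil_iff, PySem.List.mem_pyRange_one, Bool.and_eq_true,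
    decide_eq_true_eq, List.contains_iff_mem]
  constructor
  · intro h a ha hmem
    exact h a hmem ⟨ha.1, by omega⟩
  · rintro h a hmem ⟨h1, h2⟩
    exact h a ⟨h1, by omega⟩ hmem

-- sorted(set(valid_months)) is exactly pvPresent
theorem pvSorted_eq (months : List Int) :
    PySem.List.sorted (PySem.Set.ofList (months.filter (fun month => decide (1 ≤ month) && decide (month ≤ 12))))
      (fun x => x) false = pvPresent months := by
  unfold pvPresent
  apply PySem.List.sorted_eq_of_perm_of_pairwise_lt
  · rw [List.perm_ext_iff_of_nodup ((PySem.List.nodup_pyRange_one 1 13).filter _) (PySem.Set.nodup_ofList _)]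
    intro a
    simp only [List.mem_filter, PySem.List.mem_pyRange_one, PySem.Set.mem_ofList,
      Bool.and_eq_true, decide_eq_true_eq, List.contains_iff_mem]
    constructor
    · rintro ⟨⟨h1, h2⟩, hm⟩; exact ⟨hm, h1, by omega⟩
    · rintro ⟨hm, h1, h2⟩; exact ⟨⟨h1, by omega⟩, hm⟩
  · exact (PySem.List.pairwise_lt_pyRange_one 1 13).filter _

theorem pvA_eq (months : List Int) (year : Int) :
    format_period_segment_py months year = pvLabelA (pvPresent months) ++ pvYY year := by
  simp only [format_period_segment_py, pvLabelA, pvCondA, pvQA, pvYY]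
  by_cases hv : months.filter (fun month => decide (1 ≤ month) && decide (month ≤ 12)) = []
  · have hp : pvPresent months = [] := (pvEmpty_iff months).mp hv
    rw [if_pos hv, if_pos hp]
  · have hp : ¬ pvPresent months = [] := fun h => hv ((pvEmpty_iff months).mpr h)
    rw [if_neg hv, if_neg hp, pvSorted_eq]
    split_ifs <;> simp only [String.append_assoc]

theorem pvB_eq (months : List Int) (year : Int) :
    format_period_segment_py_alt months year = pvLabelB (pvMask months) ++ pvYY year := by
  simp only [format_period_segment_py_alt, pvLabelB, pvCondB, pvQB, pvMask, pvYY]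
  split_ifs <;> simp only [String.append_assoc]

-- pvOK is exactly what makes the two labels coincide
theorem pvOK_label (u : List Int) (h : pvOK u = true) : pvLabelA u = pvLabelB (pvMask u) := by
  simp only [pvOK, Bool.and_eq_true, Bool.or_eq_true, beq_iff_eq, Bool.not_eq_eq_eq_not,
    Bool.not_true] at h
  obtain ⟨⟨⟨h1, h2⟩, h3⟩, h4⟩ := h
  unfold pvLabelA pvLabelB
  by_cases hu : u = []
  · have h0 : (pvMask u == 0) = true := by
      rw [← h1]; simp [hu]
    rw [if_pos hu, h0]
    simp
  · have h0 : (pvMask u == 0) = false := by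
      rw [← h1]; simp [hu]
    rw [if_neg hu, h0]
    simp only [Bool.false_eq_true, if_false]
    cases hcb : pvCondB (pvMask u)
    · have ha : pvCondA u = false := by rw [h2, hcb]
      rw [ha]
      simp only [Bool.false_eq_true, if_false]
      unfold pvMB at h4
      conv_lhs => rw [← h4]
      rw [List.map_map]
      rfl
    · have ha : pvCondA u = true := by rw [h2, hcb]
      have hq : pvQA u = pvQB (pvMask u) := by
        rcases h3 with h3 | h3
        · rw [hcb] at h3; cases h3
        · exact h3
      rw [ha, hq]
      simp

-- ===== VERDICT (by name: the statement is the Claim_ definition above) =====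
theorem format_period_segment_py_spec : Claim_equal_format_period_segment_py := by
  intro months year _
  unfold Spec_format_period_segment_py
  rw [pvA_eq, pvB_eq, pvPresent_eq, pvOK_label _ (pvOK_mask months)]
  have : pvMask (pvMB (pvMask months)) = pvMask months := by
    rw [← pvPresent_eq, ← pvMask_present]
  rw [this]
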